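-- pv_equiv track=rewrite | github.com/matwerner/algorithms-for-datascience | locality-sensitive-hashing/cluster_helper.py | cluster_dict2set
-- ===== SOURCE A (Python) =====
-- def  cluster_dict2set(cluster_dict):
-- 	'''
-- 		Receives a cluster dict and computes a neightbourhood dict
--
-- 		INPUT
-- 			cluster_dict<int,int>: each value from the cluster dict is an integer
--
-- 		OUTPUT
-- 			neighbour_dict<int,set<int>>: each value from the neightbour dict is a set of integers of variable size
--
--
-- 	'''
-- 	neighbours_mapping={}
-- 	for key, value in cluster_dict.items():
-- 		if value in neighbours_mapping:
-- 			neighbours_mapping[value].append(key)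
-- 		else:
-- 			neighbours_mapping[value]=[key]
-- 	return {key:set(neighbours_mapping[value]) for key, value in cluster_dict.items()}
-- ===== SOURCE B (Python) =====
-- def cluster_dict2set(cluster_dict):
--     items = list(cluster_dict.items())
--     return {key: {k for k, v in items if v == value} for key, value in items}
-- ===== Notes on version B (the rewrite author's own statement) =====
-- stated objective: simpler
-- what changed: B drops A's intermediate value->list bucket dict entirely and builds each key's neighbour set directly with a nested set comprehension over the items (a direct re-scan per key instead of hash-bucket accumulation).
import Mathlib
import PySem

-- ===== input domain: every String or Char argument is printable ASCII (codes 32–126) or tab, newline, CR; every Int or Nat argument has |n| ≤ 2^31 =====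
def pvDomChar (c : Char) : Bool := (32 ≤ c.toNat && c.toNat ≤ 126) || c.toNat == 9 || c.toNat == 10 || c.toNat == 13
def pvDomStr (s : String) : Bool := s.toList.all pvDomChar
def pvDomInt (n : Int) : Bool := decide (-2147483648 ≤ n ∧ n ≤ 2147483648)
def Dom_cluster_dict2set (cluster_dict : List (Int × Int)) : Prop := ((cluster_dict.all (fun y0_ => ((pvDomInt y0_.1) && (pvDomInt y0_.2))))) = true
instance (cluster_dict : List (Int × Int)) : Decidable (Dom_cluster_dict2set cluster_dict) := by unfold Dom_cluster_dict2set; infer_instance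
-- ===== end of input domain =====

-- B replaces A's intermediate value->list bucket dict with a direct nested set
-- comprehension over the items; objective: simpler (same return value; no speed claim).

-- ===== PORT A =====
def cluster_dict2set (cluster_dict : List (Int × Int)) : List (Int × List Int) :=
  -- neighbours_mapping loop: if value in m: m[value].append(key) else m[value]=[key]
  -- = m[value] = m.get(value, []) + [key], i.e. Dict.modify value [] (· ++ [key])
  let neighbours_mapping : PySem.Dict Int (List Int) :=
    cluster_dict.foldl (fun m kv => m.modify kv.2 [] (fun l => l ++ [kv.1])) PySem.Dict.empty
  -- {key: set(neighbours_mapping[value]) for key, value in cluster_dict.items()}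
  (cluster_dict.foldl
    (fun d kv => d.insert kv.1 (PySem.Set.ofList (neighbours_mapping.getD kv.2 [])))
    (PySem.Dict.empty : PySem.Dict Int (List Int))).items

-- ===== PORT B =====
def cluster_dict2set_alt (cluster_dict : List (Int × Int)) : List (Int × List Int) :=
  -- {key: {k for k, v in items if v == value} for key, value in items}
  (cluster_dict.foldl
    (fun d kv =>
      d.insert kv.1
        (PySem.Set.ofList ((cluster_dict.filter (fun p => p.2 == kv.2)).map Prod.fst)))
    (PySem.Dict.empty : PySem.Dict Int (List Int))).items

-- ===== PRECONDITION & SPEC =====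
-- Pre_ excludes association lists with duplicate keys: the Python argument is a dict,
-- whose keys are necessarily distinct, so such lists do not represent any dict input.
def Pre_cluster_dict2set (cluster_dict : List (Int × Int)) : Prop :=
  (cluster_dict.map Prod.fst).Nodup
instance (cluster_dict : List (Int × Int)) : Decidable (Pre_cluster_dict2set cluster_dict) := by unfold Pre_cluster_dict2set; infer_instance
def pvWitness_cluster_dict2set : (List (Int × Int)) := [(1, 7), (2, 7), (3, 5)]
def Spec_cluster_dict2set (cluster_dict : List (Int × Int)) (out : List (Int × List Int)) : Prop := out = cluster_dict2set_alt cluster_dict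
instance (cluster_dict : List (Int × Int)) (out : List (Int × List Int)) : Decidable (Spec_cluster_dict2set cluster_dict out) := by unfold Spec_cluster_dict2set; infer_instance

-- ===== CLAIM (what is proved, stated in full; the proofs are below) =====
def Claim_equal_cluster_dict2set : Prop := ∀ (cluster_dict : List (Int × Int)), Dom_cluster_dict2set cluster_dict → Pre_cluster_dict2set cluster_dict → Spec_cluster_dict2set cluster_dict (cluster_dict2set cluster_dict)

-- ===== LEMMAS AND PROOFS =====

-- the bucket fold's entry at v is the keys of the items whose value is v, in order
theorem getD_bucket_fold (l : List (Int × Int)) (d : PySem.Dict Int (List Int)) (v : Int) :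
    (l.foldl (fun m kv => m.modify kv.2 [] (fun l => l ++ [kv.1])) d).getD v []
      = d.getD v [] ++ (l.filter (fun p => p.2 == v)).map Prod.fst := by
  induction l generalizing d with
  | nil => simp
  | cons kv tl ih =>
    simp only [List.foldl_cons, List.filter_cons]
    by_cases h : kv.2 = v
    · subst h
      simp [ih, PySem.Dict.getD_modify_self]
    · have : (kv.2 == v) = false := by simp [h]
      have h' : v ≠ kv.2 := fun hv => h hv.symm
      simp [ih, this, PySem.Dict.getD_modify, h']

theorem pvWitness_holds :
    Dom_cluster_dict2set pvWitness_cluster_dict2set ∧ Pre_cluster_dict2set pvWitness_cluster_dict2set := by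
  constructor <;> decide

-- ===== VERDICT (by name: the statement is the Claim_ definition above) =====
theorem cluster_dict2set_spec : Claim_equal_cluster_dict2set := by
  intro cluster_dict _hdom _hpre
  unfold Spec_cluster_dict2set cluster_dict2set cluster_dict2set_alt
  have hstep :
      (fun (d : PySem.Dict Int (List Int)) (kv : Int × Int) =>
          d.insert kv.1
            (PySem.Set.ofList
              ((cluster_dict.foldl (fun m kv => m.modify kv.2 [] (fun l => l ++ [kv.1]))
                  PySem.Dict.empty).getD kv.2 [])))
        = (fun (d : PySem.Dict Int (List Int)) (kv : Int × Int) =>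
          d.insert kv.1
            (PySem.Set.ofList ((cluster_dict.filter (fun p => p.2 == kv.2)).map Prod.fst))) := by
    funext d kv
    rw [getD_bucket_fold]
    simp
  simp only [hstep]
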